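-- pv_equiv track=rewrite | github.com/ronbutan/AlgorithmDesignAssignment | A3Q1.py | LCMS
-- ===== SOURCE A (Python) =====
-- def LCMS(a, b):
--     lenA = len(a)
--     lenB = len(b)
--     # find Longest Common Subsequence between A and B
--     storageMatrix = [[0 for i in range(lenB + 1)] for j in range(lenA + 1)]
--     larger = float("-inf")
--     for row in range(1, lenA+1): # O(ab) = O(n)
--         for col in range(1, lenB+1):
--             if a[row - 1] == b[col - 1]:
--                 storageMatrix[row][col] = storageMatrix[row-1][col-1] + 1
--             else:
--                 larger = max(storageMatrix[row-1][col], storageMatrix[row][col-1])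
--                 storageMatrix[row][col] = larger
--     row = lenA
--     col = lenB
--     dummy = []
--     # find the elements that forms the Longest Common Subsequence between A and B
--     while row > 0 and col > 0: # O(n)
--         if a[row-1] == b[col-1]:
--             dummy.insert(0, b[col-1].zfill(4))
--             col-=1
--             row-=1
--         elif storageMatrix[row][col-1] > storageMatrix[row-1][col]:
--             col-=1
--         else:
--             row-=1
--
--     lenLongest = 0
--     # list of 1 element is also mountain of length 1, there minimum increasing sequence is 1
--     lstIncr = [1 for n in dummy]
--     lstDecr = [1 for n in dummy]
--     for i in range(1, len(dummy)): # O(n**2)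
--         for j in range(0,i):
--             # length of sequence at back must be larger or equal than length in front
--             if dummy[i] > dummy[j]:
--                 lstIncr[i] = max(lstIncr[i], lstIncr[j] + 1)
--
--
--     for i in range(len(dummy)-2, -1,-1): # O(n**2)
--         for j in range(len(dummy)-1,i,-1):
--             # length of sequence at back must be larger or equal than length in front
--             if dummy[i] > dummy[j]:
--                 lstDecr[i] = max(lstDecr[i], lstDecr[j] + 1)
--
--
--     for i in range(0, len(dummy)): # O(n)
--         lenLongest = max(lstIncr[i] + lstDecr[i] - 1, lenLongest)
--     return lenLongest if lenLongest <= 1000 else 1000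
-- ===== SOURCE B (Python) =====
-- def LCMS(a, b):
--     # LCS table built row by row as immutable rows (scan), iterative backtrack
--     # appending then reversing, and longest-bitonic via patience sorting
--     # (tails list) instead of the quadratic per-pair DP.
--     prev = [0] * (len(b) + 1)
--     rows = [prev]
--     for x in a:
--         cur = [0]
--         for k, y in enumerate(b):
--             cur.append(prev[k] + 1 if x == y else max(prev[k + 1], cur[k]))
--         rows.append(cur)
--         prev = cur
--     i, j = len(a), len(b)
--     rev = []
--     while i and j:
--         if a[i - 1] == b[j - 1]:
--             rev.append(b[j - 1].zfill(4))
--             i -= 1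
--             j -= 1
--         elif rows[i][j - 1] > rows[i - 1][j]:
--             j -= 1
--         else:
--             i -= 1
--     s = rev[::-1]
--
--     def lis_lengths(xs):
--         # patience sorting: tails[k] = smallest tail of a strictly increasing
--         # subsequence of length k+1 seen so far
--         tails = []
--         lens = []
--         for x in xs:
--             c = 0
--             while c < len(tails) and tails[c] < x:
--                 c += 1
--             if c == len(tails):
--                 tails.append(x)
--             else:
--                 tails[c] = x
--             lens.append(c + 1)
--         return lens
--
--     incr = lis_lengths(s)
--     decr = lis_lengths(s[::-1])
--     best = 0
--     for u, d in zip(incr, reversed(decr)):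
--         best = max(best, u + d - 1)
--     return min(best, 1000)
-- ===== Notes on version B (the rewrite author's own statement) =====
-- stated objective: alternative
-- what changed: B builds the LCS table as an immutable row-by-row scan instead of index-mutating a preallocated matrix, backtracks by appending and reversing instead of insert(0,..), and computes the increasing/decreasing subsequence lengths by patience sorting (a sorted tails list scanned per element) instead of the per-pair O(n^2) DP arrays.
import Mathlib
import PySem

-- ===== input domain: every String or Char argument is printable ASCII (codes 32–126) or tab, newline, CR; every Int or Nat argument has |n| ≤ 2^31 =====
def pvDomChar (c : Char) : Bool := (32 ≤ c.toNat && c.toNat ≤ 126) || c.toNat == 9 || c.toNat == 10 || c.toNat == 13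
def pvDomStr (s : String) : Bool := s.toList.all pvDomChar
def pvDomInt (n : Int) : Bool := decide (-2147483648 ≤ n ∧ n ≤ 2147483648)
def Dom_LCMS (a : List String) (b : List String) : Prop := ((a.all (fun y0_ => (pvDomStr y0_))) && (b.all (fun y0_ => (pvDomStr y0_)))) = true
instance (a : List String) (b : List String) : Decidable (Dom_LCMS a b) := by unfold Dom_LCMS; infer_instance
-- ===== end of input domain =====

-- B replaces A's index-mutated DP arrays by a row-scan LCS table, an append/reverse
-- backtrack and patience sorting (a tails list) for the increasing/decreasing
-- subsequence lengths; same exact value (objective: alternative).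

-- ===== PORT A =====
-- Every list index A uses is in range, so Python's xs[i] is ported as List.getD
-- (exact here); range(...) loop counters are non-negative, ported as Nat ranges.

-- the nested loops filling storageMatrix (the unused variable `larger` has no effect)
def lcmsMatrix (a b : List String) : List (List Int) :=
  (List.range' 1 a.length).foldl (fun m row =>
    (List.range' 1 b.length).foldl (fun m col =>
      let v : Int :=
        if a.getD (row - 1) "" = b.getD (col - 1) "" then
          (m.getD (row - 1) []).getD (col - 1) 0 + 1
        else
          max ((m.getD (row - 1) []).getD col 0) ((m.getD row []).getD (col - 1) 0)
      m.set row ((m.getD row []).set col v)) m)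
    (List.replicate (a.length + 1) (List.replicate (b.length + 1) (0 : Int)))

-- the while loop collecting `dummy` (dummy.insert(0, x) prepends)
def traceA (a b : List String) (m : List (List Int)) : Nat → Nat → List String → List String
  | r + 1, c + 1, dummy =>
    if a.getD r "" = b.getD c "" then
      traceA a b m r c (PySem.Str.zfill (b.getD c "") 4 :: dummy)
    else if (m.getD (r + 1) []).getD c 0 > (m.getD r []).getD (c + 1) 0 then
      traceA a b m (r + 1) c dummy
    else
      traceA a b m r (c + 1) dummy
  | _, _, dummy => dummy
termination_by r c _ => r + c

-- the lstIncr double loop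
def incrA (s : List String) : List Int :=
  (List.range' 1 (s.length - 1)).foldl (fun L i =>
    (List.range i).foldl (fun L j =>
      if s.getD i "" > s.getD j "" then L.set i (max (L.getD i 0) (L.getD j 0 + 1)) else L) L)
    (List.replicate s.length (1 : Int))

-- the lstDecr double loop: range(n-2,-1,-1) = (range (n-1)).reverse and
-- range(n-1,i,-1) = (range' (i+1) (n-1-i)).reverse
def decrA (s : List String) : List Int :=
  ((List.range (s.length - 1)).reverse).foldl (fun L i =>
    ((List.range' (i + 1) (s.length - 1 - i)).reverse).foldl (fun L j =>
      if s.getD i "" > s.getD j "" then L.set i (max (L.getD i 0) (L.getD j 0 + 1)) else L) L)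
    (List.replicate s.length (1 : Int))

def LCMS (a : List String) (b : List String) : Int :=
  let m := lcmsMatrix a b
  let dummy := traceA a b m a.length b.length []
  let lstIncr := incrA dummy
  let lstDecr := decrA dummy
  let lenLongest := (List.range dummy.length).foldl
    (fun acc i => max (lstIncr.getD i 0 + lstDecr.getD i 0 - 1) acc) 0
  if lenLongest ≤ 1000 then lenLongest else 1000

-- ===== PORT B =====
-- enumerate(b) yields non-negative indices, ported as zipIdx (pairs (y, k), k : Nat)

def stepRowB (b : List String) (prev : List Int) (x : String) : List Int :=
  b.zipIdx.foldl (fun cur yk =>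
    cur ++ [if x = yk.1 then prev.getD yk.2 0 + 1
            else max (prev.getD (yk.2 + 1) 0) (cur.getD yk.2 0)]) [(0 : Int)]

def rowsB (a b : List String) : List (List Int) :=
  (a.foldl (fun st x =>
      let cur := stepRowB b st.2 x
      (st.1 ++ [cur], cur))
    ([List.replicate (b.length + 1) (0 : Int)], List.replicate (b.length + 1) (0 : Int))).1

-- the while loop appending into `rev` (reversed at the end)
def traceB (a b : List String) (m : List (List Int)) : Nat → Nat → List String → List String
  | i + 1, j + 1, rev =>
    if a.getD i "" = b.getD j "" then
      traceB a b m i j (rev ++ [PySem.Str.zfill (b.getD j "") 4])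
    else if (m.getD (i + 1) []).getD j 0 > (m.getD i []).getD (j + 1) 0 then
      traceB a b m (i + 1) j rev
    else
      traceB a b m i (j + 1) rev
  | _, _, rev => rev
termination_by i j _ => i + j

-- patience sorting; the linear scan `while c < len(tails) and tails[c] < x: c += 1`
-- computes the length of the longest prefix of tails that is < x (takeWhile)
def lisStep (st : List String × List Int) (x : String) : List String × List Int :=
  let c := (st.1.takeWhile (fun t => t < x)).length
  (if c = st.1.length then st.1 ++ [x] else st.1.set c x, st.2 ++ [(c : Int) + 1])

def lisLens (xs : List String) : List Int := (xs.foldl lisStep ([], [])).2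

def LCMS_alt (a : List String) (b : List String) : Int :=
  let m := rowsB a b
  let s := (traceB a b m a.length b.length []).reverse
  let incr := lisLens s
  let decr := lisLens s.reverse
  let best := (incr.zip decr.reverse).foldl (fun best ud => max best (ud.1 + ud.2 - 1)) 0
  min best 1000

-- ===== PRECONDITION & SPEC =====
def Spec_LCMS (a : List String) (b : List String) (out : Int) : Prop := out = LCMS_alt a b
instance (a : List String) (b : List String) (out : Int) : Decidable (Spec_LCMS a b out) := by unfold Spec_LCMS; infer_instance

-- ===== CLAIM (what is proved, stated in full; the proofs are below) =====
def Claim_equal_LCMS : Prop := ∀ (a : List String) (b : List String), Dom_LCMS a b → Spec_LCMS a b (LCMS a b)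

-- ===== LEMMAS AND PROOFS =====

-- reference quadratic DP accumulator: (element, strict-LIS length ending there)
def dpStep (acc : List (String × Int)) (x : String) : List (String × Int) :=
  acc ++ [(x, 1 + acc.foldl (fun m p => if p.1 < x then max m p.2 else m) 0)]

def dpAcc (xs : List String) : List (String × Int) := xs.foldl dpStep []

def dp (xs : List String) : List Int := (dpAcc xs).map (·.2)

-- ---- generic list-indexing helpers ----

theorem getD_append_lt {α : Type} (l r : List α) (j : Nat) (d : α) (h : j < l.length) :
    (l ++ r).getD j d = l.getD j d := by
  simp [List.getD_eq_getElem?_getD, List.getElem?_append_left h]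

theorem getD_append_ge {α : Type} (l r : List α) (j : Nat) (d : α) (h : l.length ≤ j) :
    (l ++ r).getD j d = r.getD (j - l.length) d := by
  simp [List.getD_eq_getElem?_getD, List.getElem?_append_right h]

theorem set_append_mid {α : Type} (l r : List α) (v w : α) :
    (l ++ v :: r).set l.length w = l ++ w :: r := by
  induction l with
  | nil => rfl
  | cons y t ih => simp [ih]

theorem set_append_mid' {α : Type} (l r : List α) (v w : α) (n : Nat) (h : n = l.length) :
    (l ++ v :: r).set n w = l ++ w :: r := by
  subst h
  exact set_append_mid l r v w

theorem getD_mid_indep {α : Type} (l r : List α) (u v d : α) (j : Nat) (h : j ≠ l.length) :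
    (l ++ u :: r).getD j d = (l ++ v :: r).getD j d := by
  rcases Nat.lt_or_ge j l.length with hj | hj
  · rw [getD_append_lt _ _ _ _ hj, getD_append_lt _ _ _ _ hj]
  · rw [getD_append_ge _ _ _ _ hj, getD_append_ge _ _ _ _ hj]
    have : j - l.length ≠ 0 := by omega
    obtain ⟨k, hk⟩ := Nat.exists_eq_succ_of_ne_zero this
    simp [hk]

theorem getD_eq_getElem' {α : Type} (l : List α) (j : Nat) (d : α) (h : j < l.length) :
    l.getD j d = l[j] := by
  simp [List.getD_eq_getElem?_getD, List.getElem?_eq_getElem h]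

-- ---- dpAcc basic facts ----

theorem dpAcc_append (u v : List String) : dpAcc (u ++ v) = v.foldl dpStep (dpAcc u) := by
  simp [dpAcc, List.foldl_append]

theorem dpAcc_concat (ys : List String) (x : String) :
    dpAcc (ys ++ [x]) =
      dpAcc ys ++ [(x, 1 + (dpAcc ys).foldl (fun m p => if p.1 < x then max m p.2 else m) 0)] := by
  rw [dpAcc_append]; rfl

theorem dpAcc_length (xs : List String) : (dpAcc xs).length = xs.length := by
  induction xs using List.reverseRecOn with
  | nil => rfl
  | append_singleton ys x ih => rw [dpAcc_concat]; simp [ih]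

theorem dp_length (xs : List String) : (dp xs).length = xs.length := by
  simp [dp, dpAcc_length]

theorem dpAcc_map_fst (xs : List String) : (dpAcc xs).map (·.1) = xs := by
  induction xs using List.reverseRecOn with
  | nil => rfl
  | append_singleton ys x ih => rw [dpAcc_concat]; simp [ih]

theorem dpAcc_getElem (xs : List String) (j : Nat) (h : j < (dpAcc xs).length) :
    (dpAcc xs)[j] = (xs[j]'(by rwa [← dpAcc_length]), (dp xs)[j]'(by rwa [dp_length, ← dpAcc_length])) := by
  have h1 : ((dpAcc xs).map (·.1))[j]'(by simpa using h) = xs[j]'(by rwa [← dpAcc_length]) := by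
    congr 1; exact dpAcc_map_fst xs
  have h2 : ((dpAcc xs).map (·.2))[j]'(by simpa using h) = (dp xs)[j]'(by rwa [dp_length, ← dpAcc_length]) := rfl
  simp at h1 h2
  exact Prod.ext h1 h2

theorem foldl_dpStep_growth (v : List String) (acc : List (String × Int)) :
    ∃ w, v.foldl dpStep acc = acc ++ w := by
  induction v generalizing acc with
  | nil => exact ⟨[], by simp⟩
  | cons x t ih =>
    obtain ⟨w, hw⟩ := ih (dpStep acc x)
    refine ⟨(x, 1 + acc.foldl (fun m p => if p.1 < x then max m p.2 else m) 0) :: w, ?_⟩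
    rw [List.foldl_cons, hw]
    simp [dpStep]

theorem dpAcc_prefix (xs : List String) (i : Nat) :
    ∃ w, dpAcc xs = dpAcc (xs.take i) ++ w := by
  obtain ⟨w, hw⟩ := foldl_dpStep_growth (xs.drop i) (dpAcc (xs.take i))
  refine ⟨w, ?_⟩
  conv_lhs => rw [← List.take_append_drop i xs]
  rw [dpAcc_append, hw]

theorem dpAcc_take_getElem (xs : List String) (i j : Nat) (hj : j < i) (hi : i ≤ xs.length) :
    (dpAcc (xs.take i)).getD j ("", 0) =
      (xs.getD j "", (dp xs).getD j 0) := by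
  have hjl : j < xs.length := lt_of_lt_of_le hj hi
  have hlen : (dpAcc (xs.take i)).length = i := by
    rw [dpAcc_length, List.length_take]; omega
  have hjd : j < (dpAcc (xs.take i)).length := by omega
  obtain ⟨w, hw⟩ := dpAcc_prefix xs i
  have hdx : j < (dpAcc xs).length := by rw [dpAcc_length]; omega
  have hsome : (dpAcc (xs.take i))[j]'hjd = (dpAcc xs)[j]'hdx := by
    have h1 : (dpAcc xs)[j]? = some ((dpAcc (xs.take i))[j]'hjd) := by
      rw [hw, List.getElem?_append_left hjd, List.getElem?_eq_getElem hjd]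
    have h2 : (dpAcc xs)[j]? = some ((dpAcc xs)[j]'hdx) := List.getElem?_eq_getElem hdx
    exact (Option.some.inj (h1.symm.trans h2))
  rw [getD_eq_getElem' _ _ _ hjd, getD_eq_getElem' _ _ _ hjl,
      getD_eq_getElem' _ _ _ (show j < (dp xs).length by rw [dp_length]; omega)]
  rw [dpAcc_getElem] at hsome
  rw [dpAcc_getElem xs j hdx] at hsome
  rw [dpAcc_getElem]
  exact hsome

theorem dp_take_getD (xs : List String) (i : Nat) (hi : i < xs.length) :
    (dp (xs.take (i + 1))) = dp (xs.take i) ++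
      [1 + (dpAcc (xs.take i)).foldl
        (fun m p => if p.1 < xs.getD i "" then max m p.2 else m) 0] := by
  have ht : xs.take (i + 1) = xs.take i ++ [xs.getD i ""] := by
    rw [List.take_add_one]
    simp [List.getElem?_eq_getElem hi, List.getD_eq_getElem?_getD]
  rw [ht, dp, dpAcc_concat]
  simp [dp]

theorem foldl_refmax_ge (l : List (String × Int)) (x : String) (v : Int) :
    v ≤ l.foldl (fun m p => if p.1 < x then max m p.2 else m) v := by
  induction l generalizing v with
  | nil => simp
  | cons p t ih =>
    simp only [List.foldl_cons]
    split
    · exact le_trans (le_max_left _ _) (ih _)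
    · exact ih v

theorem foldl_refmax_le (l : List (String × Int)) (x : String) (v B : Int)
    (hv : v ≤ B) (hl : ∀ p ∈ l, p.1 < x → p.2 ≤ B) :
    l.foldl (fun m p => if p.1 < x then max m p.2 else m) v ≤ B := by
  induction l generalizing v with
  | nil => simpa
  | cons p t ih =>
    simp only [List.foldl_cons]
    split
    · rename_i h
      exact ih _ (max_le hv (hl p (List.mem_cons_self) h))
        (fun q hq hqx => hl q (List.mem_cons_of_mem _ hq) hqx)
    · exact ih _ hv (fun q hq hqx => hl q (List.mem_cons_of_mem _ hq) hqx)

theorem foldl_refmax_ge_elem (l : List (String × Int)) (x : String) (v : Int) :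
    ∀ p ∈ l, p.1 < x → p.2 ≤ l.foldl (fun m p => if p.1 < x then max m p.2 else m) v := by
  induction l generalizing v with
  | nil => simp
  | cons q t ih =>
    intro p hp hpx
    rcases List.mem_cons.1 hp with h | h
    · subst h
      simp only [List.foldl_cons, if_pos hpx]
      exact le_trans (le_max_right _ _) (foldl_refmax_ge t x _)
    · simp only [List.foldl_cons]
      exact ih _ p h hpx

theorem dp_getD_eq_snd (ys : List String) (j : Nat) (h : j < ys.length) :
    (dp ys).getD j 0 = ((dpAcc ys).getD j ("", 0)).2 := by
  rw [getD_eq_getElem' _ _ _ (by rw [dp_length]; exact h),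
      getD_eq_getElem' _ _ _ (by rw [dpAcc_length]; exact h)]
  simp [dp]

theorem foldl_range_pairs (l : List (String × Int)) (x : String) (v : Int) :
    (List.range l.length).foldl (fun v j =>
        if (l.getD j ("", 0)).1 < x then max v ((l.getD j ("", 0)).2 + 1) else v) v
      = l.foldl (fun v p => if p.1 < x then max v (p.2 + 1) else v) v := by
  induction l using List.reverseRecOn with
  | nil => simp
  | append_singleton t p ih =>
    rw [List.length_append, List.length_singleton, List.range_succ, List.foldl_append,
      List.foldl_append]
    have hbody : ∀ (w : Int), ∀ j ∈ List.range t.length,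
        (if ((t ++ [p]).getD j ("", 0)).1 < x then max w (((t ++ [p]).getD j ("", 0)).2 + 1) else w)
        = (if (t.getD j ("", 0)).1 < x then max w ((t.getD j ("", 0)).2 + 1) else w) := by
      intro w j hj
      rw [getD_append_lt _ _ _ _ (List.mem_range.1 hj)]
    rw [PySem.List.foldl_congr_mem _ _ _ _ hbody, ih]
    have hlast : (t ++ [p]).getD t.length ("", 0) = p := by
      rw [getD_append_ge _ _ _ _ (le_refl _), Nat.sub_self]; rfl
    simp [hlast]

theorem foldl_range_pairs' (l : List (String × Int)) (n : Nat) (hn : n = l.length)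
    (x : String) (v : Int) :
    (List.range n).foldl (fun v j =>
        if (l.getD j ("", 0)).1 < x then max v ((l.getD j ("", 0)).2 + 1) else v) v
      = l.foldl (fun v p => if p.1 < x then max v (p.2 + 1) else v) v := by
  subst hn
  exact foldl_range_pairs l x v

theorem dp_getD_succ (xs : List String) (i : Nat) (hi : i < xs.length) :
    (dp xs).getD i 0
      = 1 + (dpAcc (xs.take i)).foldl
          (fun m p => if p.1 < xs.getD i "" then max m p.2 else m) 0 := by
  have h := dpAcc_take_getElem xs (i + 1) i (by omega) (by omega)
  have ht : xs.take (i + 1) = xs.take i ++ [xs.getD i ""] := by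
    rw [List.take_add_one]
    simp [List.getElem?_eq_getElem hi, List.getD_eq_getElem?_getD]
  rw [ht, dpAcc_concat] at h
  have hlen : (dpAcc (xs.take i)).length = i := by
    rw [dpAcc_length, List.length_take]; omega
  rw [getD_append_ge _ _ _ _ (by omega)] at h
  rw [hlen, Nat.sub_self] at h
  have h2 := congrArg Prod.snd h
  simpa using h2.symm

theorem rev_getD {α : Type} (s : List α) (d : α) (j : Nat) (hj : j < s.length) :
    s.getD j d = s.reverse.getD (s.length - 1 - j) d := by
  rw [getD_eq_getElem' _ _ _ hj,
      getD_eq_getElem' _ _ _ (by rw [List.length_reverse]; omega)]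
  rw [List.getElem_reverse]
  congr 1
  omega

theorem foldl_read_map (idx : List Nat) (f : Nat → String × Int) (x : String) (v : Int) :
    idx.foldl (fun v j => if (f j).1 < x then max v ((f j).2 + 1) else v) v
      = (idx.map f).foldl (fun v p => if p.1 < x then max v (p.2 + 1) else v) v := by
  rw [List.foldl_map]

theorem dp_head (y : String) (t : List String) : ∃ w, dp (y :: t) = 1 :: w := by
  obtain ⟨w, hw⟩ := foldl_dpStep_growth t (dpStep [] y)
  refine ⟨w.map (·.2), ?_⟩
  rw [dp]
  show ((y :: t).foldl dpStep []).map (·.2) = _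
  rw [List.foldl_cons, hw]
  rfl

-- ---- the shared inner loop of lstIncr / lstDecr ----

theorem foldl_set_mid (s : List String) (i : Nat) (idx : List Nat)
    (Pfx rest : List Int) (v0 : Int) (hP : Pfx.length = i) (hidx : ∀ j ∈ idx, j ≠ i) :
    idx.foldl (fun L j =>
        if s.getD i "" > s.getD j "" then L.set i (max (L.getD i 0) (L.getD j 0 + 1)) else L)
      (Pfx ++ v0 :: rest)
    = Pfx ++ (idx.foldl (fun v j =>
        if s.getD i "" > s.getD j "" then max v ((Pfx ++ v0 :: rest).getD j 0 + 1) else v) v0) :: rest := by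
  subst hP
  induction idx generalizing v0 with
  | nil => simp
  | cons j t ih =>
    have hjne : j ≠ Pfx.length := hidx j List.mem_cons_self
    have hidx' : ∀ q ∈ t, q ≠ Pfx.length := fun q hq => hidx q (List.mem_cons_of_mem _ hq)
    have hgi : (Pfx ++ v0 :: rest).getD Pfx.length 0 = v0 := by
      rw [getD_append_ge _ _ _ _ (le_refl _), Nat.sub_self]; rfl
    simp only [List.foldl_cons]
    by_cases hc : s.getD Pfx.length "" > s.getD j ""
    · rw [if_pos hc, if_pos hc, hgi, set_append_mid, ih _ hidx']
      congr 2
      apply PySem.List.foldl_congr_mem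
      intro acc q hq
      by_cases hcq : s.getD Pfx.length "" > s.getD q ""
      · rw [if_pos hcq, if_pos hcq,
          getD_mid_indep _ _ _ v0 _ _ (hidx' q hq)]
      · rw [if_neg hcq, if_neg hcq]
    · rw [if_neg hc, if_neg hc]
      exact ih _ hidx'

theorem foldl_max_shift (l : List (String × Int)) (x : String) (v : Int) :
    l.foldl (fun v p => if p.1 < x then max v (p.2 + 1) else v) (v + 1)
      = l.foldl (fun m p => if p.1 < x then max m p.2 else m) v + 1 := by
  induction l generalizing v with
  | nil => rfl
  | cons p t ih =>
    simp only [List.foldl_cons]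
    by_cases h : p.1 < x
    · simp only [if_pos h]
      rw [← ih]
      congr 1
      omega
    · simp only [if_neg h, ih]

-- ---- matrix: A's nested index loops equal B's row scan ----

def zrow (b : List String) : List Int := List.replicate (b.length + 1) (0 : Int)

def rowsRec (b : List String) (prev : List Int) : List String → List (List Int)
  | [] => []
  | x :: xs => stepRowB b prev x :: rowsRec b (stepRowB b prev x) xs

def lastRow (b : List String) (p : List Int) (ys : List String) : List Int :=
  ys.foldl (fun p x => stepRowB b p x) p

theorem rowsB_foldl (b ys : List String) (st : List (List Int) × List Int) :
    ys.foldl (fun st x => (st.1 ++ [stepRowB b st.2 x], stepRowB b st.2 x)) st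
      = (st.1 ++ rowsRec b st.2 ys, lastRow b st.2 ys) := by
  induction ys generalizing st with
  | nil => simp [rowsRec, lastRow]
  | cons y t ih => simp [rowsRec, lastRow, ih, List.foldl_cons]

theorem rowsRec_length (b : List String) (p : List Int) (ys : List String) :
    (rowsRec b p ys).length = ys.length := by
  induction ys generalizing p with
  | nil => rfl
  | cons y t ih => simp [rowsRec, ih]

theorem rowsRec_concat (b : List String) (p : List Int) (ys : List String) (x : String) :
    rowsRec b p (ys ++ [x]) = rowsRec b p ys ++ [stepRowB b (lastRow b p ys) x] := by
  induction ys generalizing p with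
  | nil => simp [rowsRec, lastRow]
  | cons y t ih => simp [rowsRec, lastRow, ih, List.foldl_cons]

theorem rowsRec_getD_last (b : List String) (p : List Int) (ys : List String) :
    (p :: rowsRec b p ys).getD ys.length [] = lastRow b p ys := by
  induction ys generalizing p with
  | nil => rfl
  | cons y t ih => simpa [rowsRec, lastRow, List.foldl_cons] using ih (stepRowB b p y)

theorem getD_set_ne {α : Type} (l : List α) (i j : Nat) (w d : α) (h : i ≠ j) :
    (l.set i w).getD j d = l.getD j d := by
  simp [List.getD_eq_getElem?_getD, List.getElem?_set, h]

theorem getD_set_self {α : Type} (l : List α) (i : Nat) (w d : α) (h : i < l.length) :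
    (l.set i w).getD i d = w := by
  simp [List.getD_eq_getElem?_getD, List.getElem?_set, h]

-- A's inner loop up to column k builds the first k+1 entries of B's row
def rowPart (b : List String) (prev : List Int) (x : String) (k : Nat) : List Int :=
  (b.zipIdx.take k).foldl (fun cur yk =>
    cur ++ [if x = yk.1 then prev.getD yk.2 0 + 1
            else max (prev.getD (yk.2 + 1) 0) (cur.getD yk.2 0)]) [(0 : Int)]

theorem rowPart_full (b : List String) (prev : List Int) (x : String) :
    rowPart b prev x b.length = stepRowB b prev x := by
  unfold rowPart stepRowB
  congr 1
  rw [← @List.length_zipIdx _ b 0, List.take_length]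

theorem foldl_append_one_length {α β : Type} (l : List α) (f : List β → α → β) (init : List β) :
    (l.foldl (fun cur yk => cur ++ [f cur yk]) init).length = init.length + l.length := by
  induction l generalizing init with
  | nil => simp
  | cons y t ih => simp [List.foldl_cons, ih]; omega

theorem rowPart_length (b : List String) (prev : List Int) (x : String) (k : Nat)
    (hk : k ≤ b.length) : (rowPart b prev x k).length = k + 1 := by
  unfold rowPart
  rw [foldl_append_one_length]
  simp [List.length_take, List.length_zipIdx]
  omega

theorem rowPart_succ (b : List String) (prev : List Int) (x : String) (k : Nat)
    (hk : k < b.length) :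
    rowPart b prev x (k + 1) = rowPart b prev x k ++
      [if x = b.getD k "" then prev.getD k 0 + 1
       else max (prev.getD (k + 1) 0) ((rowPart b prev x k).getD k 0)] := by
  unfold rowPart
  have hzl : k < b.zipIdx.length := by rw [List.length_zipIdx]; exact hk
  rw [List.take_add_one, List.getElem?_eq_getElem hzl]
  simp only [Option.toList_some]
  rw [List.foldl_append, List.foldl_cons, List.foldl_nil]
  simp [List.getElem_zipIdx, List.getD_eq_getElem?_getD, List.getElem?_eq_getElem hk]

theorem matrix_inner (a b : List String) (m : List (List Int)) (row : Nat)
    (h1 : 1 ≤ row) (hrow : row < m.length)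
    (hz : m.getD row [] = zrow b) (k : Nat) (hk : k ≤ b.length) :
    (List.range' 1 k).foldl (fun m col =>
      let v : Int :=
        if a.getD (row - 1) "" = b.getD (col - 1) "" then
          (m.getD (row - 1) []).getD (col - 1) 0 + 1
        else
          max ((m.getD (row - 1) []).getD col 0) ((m.getD row []).getD (col - 1) 0)
      m.set row ((m.getD row []).set col v)) m
    = m.set row (rowPart b (m.getD (row - 1) []) (a.getD (row - 1) "") k
        ++ List.replicate (b.length - k) (0 : Int)) := by
  induction k with
  | zero =>
    have h0 : rowPart b (m.getD (row - 1) []) (a.getD (row - 1) "") 0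
        ++ List.replicate (b.length - 0) (0 : Int) = zrow b := by
      show (0 : Int) :: List.replicate b.length 0 = _
      rw [zrow, List.replicate_succ]
    simp only [List.range'_zero, List.foldl_nil, h0]
    rw [← hz, getD_eq_getElem' _ _ _ hrow, List.set_getElem_self]
  | succ k ih =>
    have hk1 : k ≤ b.length := by omega
    rw [List.range'_concat, List.foldl_append, ih hk1]
    have h1k : 1 + 1 * k = k + 1 := by omega
    rw [h1k]
    simp only [List.foldl_cons, List.foldl_nil]
    have hco : k + 1 - 1 = k := by omega
    rw [hco]
    set prev := m.getD (row - 1) [] with hprev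
    set x := a.getD (row - 1) "" with hx
    set P := rowPart b prev x k ++ List.replicate (b.length - k) (0 : Int) with hP
    have hPg : (m.set row P).getD row [] = P :=
      getD_set_self m row P [] hrow
    have hPg' : (m.set row P).getD (row - 1) [] = prev := by
      rw [getD_set_ne m row (row - 1) P [] (by omega)]
    rw [hPg, hPg', List.set_set]
    congr 1
    have hrl : (rowPart b prev x k).length = k + 1 := rowPart_length b prev x k hk1
    have hrepl : List.replicate (b.length - k) (0 : Int)
        = 0 :: List.replicate (b.length - (k + 1)) 0 := by
      rw [show b.length - k = (b.length - (k + 1)) + 1 by omega, List.replicate_succ]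
    rw [hP, hrepl, set_append_mid' _ _ _ _ _ hrl.symm]
    rw [rowPart_succ b prev x k (by omega)]
    rw [List.append_assoc, List.singleton_append]
    congr 2
    rw [getD_append_lt _ _ _ _ (by rw [hrl]; omega)]

theorem matrix_outer (a b : List String) (r : Nat) (hr : r ≤ a.length) :
    (List.range' 1 r).foldl (fun m row =>
      (List.range' 1 b.length).foldl (fun m col =>
        let v : Int :=
          if a.getD (row - 1) "" = b.getD (col - 1) "" then
            (m.getD (row - 1) []).getD (col - 1) 0 + 1
          else
            max ((m.getD (row - 1) []).getD col 0) ((m.getD row []).getD (col - 1) 0)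
        m.set row ((m.getD row []).set col v)) m)
      (List.replicate (a.length + 1) (zrow b))
    = (zrow b :: rowsRec b (zrow b) (a.take r)) ++ List.replicate (a.length - r) (zrow b) := by
  induction r with
  | zero =>
    simp only [List.range'_zero, List.foldl_nil, List.take_zero]
    rw [rowsRec]
    rw [show a.length - 0 = a.length by omega]
    rfl
  | succ r ih =>
    have hr1 : r ≤ a.length := by omega
    rw [List.range'_concat, List.foldl_append, ih hr1]
    have h1r : 1 + 1 * r = r + 1 := by omega
    rw [h1r]
    simp only [List.foldl_cons, List.foldl_nil]
    have htl : (a.take r).length = r := by rw [List.length_take]; omega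
    have hfl : (zrow b :: rowsRec b (zrow b) (a.take r)).length = r + 1 := by
      rw [List.length_cons, rowsRec_length, htl]
    have hrow : r + 1 < ((zrow b :: rowsRec b (zrow b) (a.take r))
        ++ List.replicate (a.length - r) (zrow b)).length := by
      rw [List.length_append, hfl, List.length_replicate]
      omega
    have hz : ((zrow b :: rowsRec b (zrow b) (a.take r))
        ++ List.replicate (a.length - r) (zrow b)).getD (r + 1) [] = zrow b := by
      rw [getD_append_ge _ _ _ _ (by rw [hfl])]
      rw [hfl, Nat.sub_self]
      exact List.getD_replicate _ (by omega)
    rw [matrix_inner a b _ (r + 1) (by omega) hrow hz b.length (le_refl _)]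
    rw [Nat.sub_self, List.replicate_zero, List.append_nil, rowPart_full]
    have hco : r + 1 - 1 = r := by omega
    rw [hco]
    have hprev : ((zrow b :: rowsRec b (zrow b) (a.take r))
        ++ List.replicate (a.length - r) (zrow b)).getD r []
        = lastRow b (zrow b) (a.take r) := by
      rw [getD_append_lt _ _ _ _ (by rw [hfl]; omega)]
      have hgl := rowsRec_getD_last b (zrow b) (a.take r)
      rw [htl] at hgl
      exact hgl
    rw [hprev]
    have hrepl : List.replicate (a.length - r) (zrow b)
        = zrow b :: List.replicate (a.length - (r + 1)) (zrow b) := by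
      rw [show a.length - r = (a.length - (r + 1)) + 1 by omega, List.replicate_succ]
    rw [hrepl, set_append_mid' _ _ _ _ _ hfl.symm]
    have htake : a.take (r + 1) = a.take r ++ [a.getD r ""] := by
      rw [List.take_add_one, List.getElem?_eq_getElem (by omega : r < a.length)]
      simp [List.getD_eq_getElem?_getD, List.getElem?_eq_getElem (by omega : r < a.length)]
    rw [htake, rowsRec_concat]
    simp

theorem matrix_eq (a b : List String) : lcmsMatrix a b = rowsB a b := by
  have h := matrix_outer a b a.length (le_refl _)
  simp only [List.take_length, Nat.sub_self, List.replicate_zero, List.append_nil] at h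
  have hB : rowsB a b = zrow b :: rowsRec b (zrow b) a := by
    show (a.foldl (fun st x => (st.1 ++ [stepRowB b st.2 x], stepRowB b st.2 x))
        ([zrow b], zrow b)).1 = _
    rw [rowsB_foldl]
    rfl
  rw [hB, ← h]
  rfl

-- ---- trace equality ----

theorem trace_eq (a b : List String) (m : List (List Int)) (r c : Nat) (acc : List String) :
    traceA a b m r c acc = (traceB a b m r c acc.reverse).reverse := by
  fun_induction traceA a b m r c acc with
  | case1 r c dummy h ih =>
    rw [traceB]
    rw [if_pos h]
    simpa using ih
  | case2 r c dummy h1 h2 ih =>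
    rw [traceB, if_neg h1, if_pos h2]
    exact ih
  | case3 r c dummy h1 h2 ih =>
    rw [traceB, if_neg h1, if_neg h2]
    exact ih
  | case4 r c dummy h =>
    rcases r with _ | r
    · rw [traceB.eq_def]
      simp
    · rcases c with _ | c
      · rw [traceB.eq_def]
        simp
      · exact absurd rfl (fun he => h r c he rfl)

-- ---- A's quadratic DP loops equal dp ----

theorem incr_outer (s : List String) (k : Nat) (hk : k + 1 ≤ s.length) :
    (List.range' 1 k).foldl (fun L i =>
      (List.range i).foldl (fun L j =>
        if s.getD i "" > s.getD j "" then L.set i (max (L.getD i 0) (L.getD j 0 + 1)) else L) L)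
      (List.replicate s.length (1 : Int))
    = dp (s.take (k + 1)) ++ List.replicate (s.length - (k + 1)) (1 : Int) := by
  induction k with
  | zero =>
    rcases s with _ | ⟨y, t⟩
    · simp at hk
    · have h1 : dp [y] = [1] := rfl
      simp [h1, List.replicate_succ]
  | succ k ih =>
    have hk1 : k + 1 ≤ s.length := by omega
    rw [List.range'_concat, List.foldl_append, ih hk1]
    have h1k : 1 + 1 * k = k + 1 := by omega
    rw [h1k]
    simp only [List.foldl_cons, List.foldl_nil]
    have hPlen : (dp (s.take (k + 1))).length = k + 1 := by
      rw [dp_length, List.length_take]; omega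
    have hrep : List.replicate (s.length - (k + 1)) (1 : Int)
        = 1 :: List.replicate (s.length - (k + 2)) 1 := by
      have h2 : s.length - (k + 1) = (s.length - (k + 2)) + 1 := by omega
      rw [h2, List.replicate_succ]
    rw [hrep]
    rw [foldl_set_mid s (k + 1) _ _ _ _ hPlen
      (by intro j hj; have := List.mem_range.1 hj; omega)]
    have hbody : ∀ (v : Int), ∀ j ∈ List.range (k + 1),
        (if s.getD (k + 1) "" > s.getD j "" then
          max v ((dp (s.take (k + 1)) ++ 1 :: List.replicate (s.length - (k + 2)) 1).getD j 0 + 1)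
        else v)
        = (if ((dpAcc (s.take (k + 1))).getD j ("", 0)).1 < s.getD (k + 1) "" then
            max v (((dpAcc (s.take (k + 1))).getD j ("", 0)).2 + 1) else v) := by
      intro v j hj
      have hjk : j < k + 1 := List.mem_range.1 hj
      have hget := dpAcc_take_getElem s (k + 1) j hjk hk1
      rw [hget]
      have hL : (dp (s.take (k + 1)) ++ 1 :: List.replicate (s.length - (k + 2)) 1).getD j 0
          = (dp s).getD j 0 := by
        rw [getD_append_lt _ _ _ _ (by rw [hPlen]; exact hjk)]
        rw [dp_getD_eq_snd (s.take (k + 1)) j (by rw [List.length_take]; omega)]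
        have h2 := congrArg Prod.snd hget
        simpa using h2
      rw [hL]
    have hc : (List.range (k + 1)).foldl (fun v j =>
          if s.getD (k + 1) "" > s.getD j "" then
            max v ((dp (s.take (k + 1)) ++ 1 :: List.replicate (s.length - (k + 2)) 1).getD j 0 + 1)
          else v) 1
        = 1 + (dpAcc (s.take (k + 1))).foldl
            (fun m p => if p.1 < s.getD (k + 1) "" then max m p.2 else m) 0 := by
      rw [PySem.List.foldl_congr_mem _ _ _ _ hbody]
      rw [foldl_range_pairs' (dpAcc (s.take (k + 1))) (k + 1)
        (by rw [dpAcc_length, List.length_take, Nat.min_eq_left hk1])]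
      have hshift := foldl_max_shift (dpAcc (s.take (k + 1))) (s.getD (k + 1) "") 0
      rw [show (0 : Int) + 1 = 1 from rfl] at hshift
      rw [hshift]
      omega
    rw [hc, dp_take_getD s (k + 1) (by omega), List.append_assoc, List.singleton_append]

theorem incrA_eq (s : List String) : incrA s = dp s := by
  rcases s with _ | ⟨y, t⟩
  · rfl
  · have h := incr_outer (y :: t) ((y :: t).length - 1) (by simp)
    unfold incrA
    simp only [List.length_cons, Nat.add_sub_cancel] at h ⊢
    rw [h]
    rw [show t.length + 1 = (y :: t).length from rfl, List.take_length]
    simp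

theorem decr_outer (s : List String) (d : Nat) (hd : d ≤ s.length - 1) (hn : 1 ≤ s.length) :
    ((List.range' (s.length - 1 - d) d).reverse).foldl (fun L i =>
      ((List.range' (i + 1) (s.length - 1 - i)).reverse).foldl (fun L j =>
        if s.getD i "" > s.getD j "" then L.set i (max (L.getD i 0) (L.getD j 0 + 1)) else L) L)
      (List.replicate s.length (1 : Int))
    = List.replicate (s.length - 1 - d) (1 : Int)
        ++ (dp s.reverse).reverse.drop (s.length - 1 - d) := by
  have hlrev : ((dp s.reverse).reverse).length = s.length := by
    rw [List.length_reverse, dp_length, List.length_reverse]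
  induction d with
  | zero =>
    rcases s with _ | ⟨y, t⟩
    · simp at hn
    · obtain ⟨y', t', hr⟩ : ∃ y' t', (y :: t).reverse = y' :: t' := by
        cases h : (y :: t).reverse with
        | nil => exact absurd h (by simp)
        | cons a l => exact ⟨a, l, rfl⟩
      obtain ⟨w, hw⟩ := dp_head y' t'
      have hn1 : (y :: t).length - 1 - 0 = t.length := by simp
      rw [hn1]
      have hd1 : t.length < ((dp (y :: t).reverse).reverse).length := by
        rw [hlrev]; simp
      have hdrop : ((dp (y :: t).reverse).reverse).drop t.length
          = [((dp (y :: t).reverse).reverse)[t.length]'hd1] := by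
        rw [List.drop_eq_getElem_cons hd1]
        congr 1
        apply List.drop_of_length_le
        rw [hlrev]; simp
      have hval : ((dp (y :: t).reverse).reverse)[t.length]'hd1 = 1 := by
        have h0 : (dp (y :: t).reverse).getD 0 0 = 1 := by rw [hr, hw]; rfl
        have h1 := rev_getD (dp (y :: t).reverse) 0 0 (by rw [hr, hw]; simp)
        rw [← getD_eq_getElem' _ _ 0 hd1]
        rw [show t.length = (dp (y :: t).reverse).length - 1 - 0 by
          rw [dp_length, List.length_reverse]; simp]
        rw [← h1]
        exact h0
      rw [hdrop, hval]
      simp [List.replicate_succ']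
  | succ d ih =>
    have hd' : d ≤ s.length - 1 := by omega
    have he : s.length - 1 - d = (s.length - 1 - (d + 1)) + 1 := by omega
    have ihh := ih hd'
    rw [he] at ihh
    rw [List.range'_succ, List.reverse_cons, List.foldl_append, ihh]
    simp only [List.foldl_cons, List.foldl_nil]
    set t := s.length - 1 - (d + 1) with hts
    have htn : t + 1 < s.length := by omega
    have hrlen : (s.reverse).length = s.length := by simp
    have hdplen : (dp s.reverse).length = s.length := by rw [dp_length, List.length_reverse]
    have hrepl : List.replicate (t + 1) (1 : Int) = List.replicate t 1 ++ [1] :=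
      List.replicate_succ' ..
    rw [hrepl, List.append_assoc, List.singleton_append]
    have hPlen : (List.replicate t (1 : Int)).length = t := by simp
    rw [foldl_set_mid s t _ _ _ _ hPlen
      (by intro j hj
          rw [List.mem_reverse, List.mem_range'_1] at hj
          omega)]
    have hbody : ∀ (v : Int), ∀ j ∈ (List.range' (t + 1) (s.length - 1 - t)).reverse,
        (if s.getD t "" > s.getD j "" then
          max v ((List.replicate t (1 : Int) ++ 1 :: (dp s.reverse).reverse.drop (t + 1)).getD j 0 + 1)
        else v)
        = (if ((dpAcc (s.reverse.take (s.length - 1 - t))).getD (s.length - 1 - j) ("", 0)).1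
              < s.getD t "" then
            max v (((dpAcc (s.reverse.take (s.length - 1 - t))).getD (s.length - 1 - j) ("", 0)).2 + 1)
          else v) := by
      intro v j hj
      rw [List.mem_reverse, List.mem_range'_1] at hj
      have hjn : j < s.length := by omega
      have hq : s.length - 1 - j < s.length - 1 - t := by omega
      have hget := dpAcc_take_getElem s.reverse (s.length - 1 - t) (s.length - 1 - j) hq
        (by rw [hrlen]; omega)
      rw [hget]
      have hL : (List.replicate t (1 : Int) ++ 1 :: (dp s.reverse).reverse.drop (t + 1)).getD j 0
          = (dp s.reverse).getD (s.length - 1 - j) 0 := by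
        rw [getD_append_ge _ _ _ _ (by rw [hPlen]; omega)]
        rw [hPlen]
        have hj1 : j - t = (j - t - 1) + 1 := by omega
        rw [hj1, List.getD_cons_succ]
        rw [List.getD_eq_getElem?_getD, List.getElem?_drop,
          show t + 1 + (j - t - 1) = j by omega, ← List.getD_eq_getElem?_getD]
        rw [rev_getD (dp s.reverse) 0 (s.length - 1 - j) (by rw [hdplen]; omega)]
        congr 1
        rw [hdplen]
        omega
      rw [hL, rev_getD s "" j hjn]
    rw [PySem.List.foldl_congr_mem _ _ _ _ hbody]
    rw [foldl_read_map]
    have hmap : ((List.range' (t + 1) (s.length - 1 - t)).reverse).map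
        (fun j => (dpAcc (s.reverse.take (s.length - 1 - t))).getD (s.length - 1 - j) ("", 0))
        = dpAcc (s.reverse.take (s.length - 1 - t)) := by
      apply List.ext_getElem
      · simp [dpAcc_length, List.length_take]
        omega
      · intro q h1 h2
        have hq : q < s.length - 1 - t := by simpa using h1
        simp only [List.getElem_map, List.getElem_reverse, List.length_range']
        rw [List.getElem_range']
        rw [show s.length - 1 - ((t + 1) + 1 * (s.length - 1 - t - 1 - q)) = q by omega]
        exact getD_eq_getElem' _ _ _ (by rw [dpAcc_length, List.length_take]; omega)
    rw [hmap]
    have hshift := foldl_max_shift (dpAcc (s.reverse.take (s.length - 1 - t))) (s.getD t "") 0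
    rw [show (0 : Int) + 1 = 1 from rfl] at hshift
    rw [hshift]
    have hcx : s.getD t "" = s.reverse.getD (s.length - 1 - t) "" := rev_getD s "" t (by omega)
    rw [hcx]
    have hval := dp_getD_succ s.reverse (s.length - 1 - t) (by rw [hrlen]; omega)
    rw [show (List.foldl (fun m p => if p.1 < s.reverse.getD (s.length - 1 - t) "" then max m p.2 else m) 0
          (dpAcc (List.take (s.length - 1 - t) s.reverse)) + 1)
        = (dp s.reverse).getD (s.length - 1 - t) 0 by rw [hval]; ring]
    have htd : t < ((dp s.reverse).reverse).length := by
      rw [List.length_reverse, hdplen]; omega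
    have hdrop : ((dp s.reverse).reverse).drop t
        = ((dp s.reverse).reverse)[t]'htd :: ((dp s.reverse).reverse).drop (t + 1) :=
      List.drop_eq_getElem_cons htd
    rw [hdrop]
    congr 1
    rw [List.getElem_reverse]
    rw [getD_eq_getElem' _ _ _ (by rw [hdplen]; omega : s.length - 1 - t < (dp s.reverse).length)]
    have hidx : s.length - 1 - t = (dp s.reverse).length - 1 - t := by rw [hdplen]
    simp only [hidx]

theorem decrA_eq (s : List String) : decrA s = (dp s.reverse).reverse := by
  rcases s with _ | ⟨y, t⟩
  · rfl
  · have h := decr_outer (y :: t) ((y :: t).length - 1) (le_refl _) (by simp)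
    unfold decrA
    rw [List.range_eq_range']
    have h0 : (y :: t).length - 1 - ((y :: t).length - 1) = 0 := by omega
    rw [h0] at h
    simpa using h

-- ---- patience sorting equals dp ----

-- invariant: tails is strictly increasing, every entry is realised by a dp value,
-- and every dp value's length has a tails entry not above its element
def DPInv (ys tails : List String) : Prop :=
  (∀ i j : Nat, i < j → j < tails.length → tails.getD i "" < tails.getD j "") ∧
  (∀ k : Nat, k < tails.length →
    ∃ p ∈ dpAcc ys, p.2 = (k : Int) + 1 ∧ p.1 = tails.getD k "") ∧
  (∀ p ∈ dpAcc ys, ∃ k : Nat, k < tails.length ∧ p.2 = (k : Int) + 1 ∧ tails.getD k "" ≤ p.1)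

theorem takeWhile_spec {α : Type} (q : α → Bool) (l : List α) (d : α) :
    (l.takeWhile q).length ≤ l.length ∧
    (∀ k < (l.takeWhile q).length, q (l.getD k d) = true) ∧
    ((l.takeWhile q).length < l.length → q (l.getD (l.takeWhile q).length d) = false) := by
  induction l with
  | nil => simp
  | cons y t ih =>
    by_cases hy : q y = true
    · obtain ⟨ih1, ih2, ih3⟩ := ih
      refine ⟨?_, ?_, ?_⟩
      · simp [List.takeWhile_cons, hy]; omega
      · intro k hk
        rcases k with _ | k
        · simpa
        · simp only [List.takeWhile_cons, hy, if_pos] at hk ⊢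
          simp at hk
          exact ih2 k (by omega)
      · intro hlt
        simp only [List.takeWhile_cons, hy, if_pos] at hlt ⊢
        simp at hlt ⊢
        exact ih3 (by omega)
    · have h0 : List.takeWhile q (y :: t) = [] := by simp [List.takeWhile_cons, hy]
      rw [h0]
      exact ⟨by simp, by simp, fun _ => by simpa using hy⟩

theorem lis_invariant_step (ys tails : List String) (lens : List Int) (x : String)
    (hJ : DPInv ys tails) (hlens : lens = dp ys) :
    DPInv (ys ++ [x]) (lisStep (tails, lens) x).1 ∧ (lisStep (tails, lens) x).2 = dp (ys ++ [x]) := by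
  obtain ⟨hS, hA, hB⟩ := hJ
  obtain ⟨htw1, htw2, htw3⟩ := takeWhile_spec (fun t => decide (t < x)) tails ""
  set c := (tails.takeWhile (fun t : String => decide (t < x))).length with hc
  have hfst : (lisStep (tails, lens) x).1
      = (if c = tails.length then tails ++ [x] else tails.set c x) := rfl
  have hsnd : (lisStep (tails, lens) x).2 = lens ++ [(c : Int) + 1] := rfl
  have hlt : ∀ k, k < c → tails.getD k "" < x := by
    intro k hk
    have := htw2 k hk
    simpa using this
  have hge : c < tails.length → x ≤ tails.getD c "" := by
    intro h
    have h3 := htw3 h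
    rw [decide_eq_false_iff_not] at h3
    exact not_lt.1 h3
  have hck : ∀ k, k < tails.length → tails.getD k "" < x → k < c := by
    intro k hk hkx
    by_contra hnk
    rw [not_lt] at hnk
    have hcl : c < tails.length := lt_of_le_of_lt hnk hk
    have hxc := hge hcl
    have hle : tails.getD c "" ≤ tails.getD k "" := by
      rcases eq_or_lt_of_le hnk with he | hl
      · rw [he]
      · exact le_of_lt (hS c k hl hk)
    exact absurd hkx (not_lt.2 (le_trans hxc hle))
  have hfold : (dpAcc ys).foldl (fun m p => if p.1 < x then max m p.2 else m) 0 = (c : Int) := by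
    apply le_antisymm
    · apply foldl_refmax_le
      · exact Int.natCast_nonneg c
      · intro p hp hpx
        obtain ⟨k, hk, hp2, hpk⟩ := hB p hp
        have hkc : k < c := hck k hk (lt_of_le_of_lt hpk hpx)
        rw [hp2]
        omega
    · rcases Nat.eq_zero_or_pos c with h0 | hpos
      · rw [h0]
        simpa using foldl_refmax_ge (dpAcc ys) x 0
      · obtain ⟨p, hp, hp2, hp1⟩ := hA (c - 1) (by omega)
        have hpx : p.1 < x := by rw [hp1]; exact hlt (c - 1) (by omega)
        have hle := foldl_refmax_ge_elem (dpAcc ys) x 0 p hp hpx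
        rw [hp2] at hle
        omega
  have hdpx : dpAcc (ys ++ [x]) = dpAcc ys ++ [(x, 1 + (c : Int))] := by
    rw [dpAcc_concat, hfold]
  have hdp2 : dp (ys ++ [x]) = dp ys ++ [(c : Int) + 1] := by
    rw [dp, hdpx, List.map_append]
    rw [show ((1 : Int) + (c : Int)) = (c : Int) + 1 from by ring]
    rfl
  constructor
  · rw [hfst]
    by_cases hcl : c = tails.length
    · -- append case
      rw [if_pos hcl]
      refine ⟨?_, ?_, ?_⟩
      · intro i j hij hj
        rw [List.length_append, List.length_singleton] at hj
        by_cases hjl : j < tails.length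
        · rw [getD_append_lt _ _ _ _ hjl, getD_append_lt _ _ _ _ (lt_trans hij hjl)]
          exact hS i j hij hjl
        · have hje : j = tails.length := by omega
          rw [hje, getD_append_ge _ _ _ _ (le_refl _), Nat.sub_self]
          rw [getD_append_lt _ _ _ _ (by omega : i < tails.length)]
          simp only [List.getD_cons_zero]
          exact hlt i (by omega)
      · intro k hk
        rw [List.length_append, List.length_singleton] at hk
        by_cases hkl : k < tails.length
        · obtain ⟨p, hp, h2, h1⟩ := hA k hkl
          exact ⟨p, by rw [hdpx]; exact List.mem_append_left _ hp, h2,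
            by rw [getD_append_lt _ _ _ _ hkl]; exact h1⟩
        · have hke : k = tails.length := by omega
          refine ⟨(x, 1 + (c : Int)), by rw [hdpx]; simp, ?_, ?_⟩
          · show (1 : Int) + (c : Int) = (k : Int) + 1
            rw [hke, ← hcl]
            ring
          · rw [hke, getD_append_ge _ _ _ _ (le_refl _), Nat.sub_self]
            simp
      · intro p hp
        rw [hdpx] at hp
        rcases List.mem_append.1 hp with h | h
        · obtain ⟨k, hk, h2, h1⟩ := hB p h
          exact ⟨k, by rw [List.length_append, List.length_singleton]; omega, h2,
            by rw [getD_append_lt _ _ _ _ hk]; exact h1⟩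
        · rw [List.mem_singleton] at h
          subst h
          refine ⟨c, by rw [List.length_append, List.length_singleton]; omega, by ring, ?_⟩
          rw [hcl, getD_append_ge _ _ _ _ (le_refl _), Nat.sub_self]
          simp
    · -- set case
      rw [if_neg hcl]
      have hclt : c < tails.length := lt_of_le_of_ne htw1 hcl
      have hxc := hge hclt
      refine ⟨?_, ?_, ?_⟩
      · intro i j hij hj
        rw [List.length_set] at hj
        by_cases hic : i = c
        · by_cases hjc : j = c
          · omega
          · rw [hic, getD_set_self _ _ _ _ hclt,
              getD_set_ne _ _ _ _ _ (fun he => hjc he.symm)]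
            exact lt_of_le_of_lt hxc (hS c j (by omega) hj)
        · by_cases hjc : j = c
          · rw [hjc, getD_set_self _ _ _ _ hclt, getD_set_ne _ _ _ _ _ (fun he => hic he.symm)]
            exact hlt i (by omega)
          · rw [getD_set_ne _ _ _ _ _ (fun he => hic he.symm),
              getD_set_ne _ _ _ _ _ (fun he => hjc he.symm)]
            exact hS i j hij hj
      · intro k hk
        rw [List.length_set] at hk
        by_cases hkc : k = c
        · refine ⟨(x, 1 + (c : Int)), by rw [hdpx]; simp, ?_, ?_⟩
          · show (1 : Int) + (c : Int) = (k : Int) + 1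
            rw [hkc]; ring
          · rw [hkc, getD_set_self _ _ _ _ hclt]
        · obtain ⟨p, hp, h2, h1⟩ := hA k hk
          exact ⟨p, by rw [hdpx]; exact List.mem_append_left _ hp, h2,
            by rw [getD_set_ne _ _ _ _ _ (fun he => hkc he.symm)]; exact h1⟩
      · intro p hp
        rw [hdpx] at hp
        rcases List.mem_append.1 hp with h | h
        · obtain ⟨k, hk, h2, h1⟩ := hB p h
          by_cases hkc : k = c
          · refine ⟨c, by rw [List.length_set]; omega, by rw [← hkc]; exact h2, ?_⟩
            rw [getD_set_self _ _ _ _ hclt]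
            exact le_trans hxc (hkc ▸ h1)
          · exact ⟨k, by rw [List.length_set]; omega, h2,
              by rw [getD_set_ne _ _ _ _ _ (fun he => hkc he.symm)]; exact h1⟩
        · rw [List.mem_singleton] at h
          subst h
          refine ⟨c, by rw [List.length_set]; omega, by ring, ?_⟩
          rw [getD_set_self _ _ _ _ hclt]
  · rw [hsnd, hlens, hdp2]

theorem lis_fold (xs ys tails : List String) (lens : List Int)
    (hJ : DPInv ys tails) (hlens : lens = dp ys) :
    (xs.foldl lisStep (tails, lens)).2 = dp (ys ++ xs) := by
  induction xs generalizing ys tails lens with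
  | nil => simpa using hlens
  | cons x t ih =>
    obtain ⟨hJ', hl'⟩ := lis_invariant_step ys tails lens x hJ hlens
    have := ih (ys ++ [x]) (lisStep (tails, lens) x).1 (lisStep (tails, lens) x).2 hJ' hl'
    simpa [List.foldl_cons] using this

theorem lisLens_eq (xs : List String) : lisLens xs = dp xs := by
  have h := lis_fold xs [] [] [] ⟨by simp, by simp [dpAcc], by simp [dpAcc]⟩ (by simp [dp, dpAcc])
  simpa [lisLens] using h

-- ---- final fold ----

theorem final_fold_eq (u v : List Int) (h : u.length = v.length) :
    (List.range u.length).foldl (fun acc i => max (u.getD i 0 + v.getD i 0 - 1) acc) 0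
      = (u.zip v).foldl (fun best ud => max best (ud.1 + ud.2 - 1)) (0 : Int) := by
  have hmap : (List.range u.length).map (fun i => (u.getD i 0, v.getD i 0)) = u.zip v := by
    apply List.ext_getElem
    · simp [h]
    · intro i h1 h2
      have hi : i < u.length := by simpa using h1
      have hiv : i < v.length := by omega
      simp [List.getElem_zip, List.getD_eq_getElem?_getD, List.getElem?_eq_getElem hi,
        List.getElem?_eq_getElem hiv]
  calc (List.range u.length).foldl (fun acc i => max (u.getD i 0 + v.getD i 0 - 1) acc) 0
      = ((List.range u.length).map (fun i => (u.getD i 0, v.getD i 0))).foldl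
          (fun acc (p : Int × Int) => max (p.1 + p.2 - 1) acc) 0 := by
        rw [List.foldl_map]
    _ = (u.zip v).foldl (fun acc (p : Int × Int) => max (p.1 + p.2 - 1) acc) 0 := by rw [hmap]
    _ = (u.zip v).foldl (fun best ud => max best (ud.1 + ud.2 - 1)) 0 := by
        congr 1
        funext acc p
        exact max_comm _ _

-- ===== VERDICT (by name: the statement is the Claim_ definition above) =====
theorem LCMS_spec : Claim_equal_LCMS := by
  intro a b _
  show LCMS a b = LCMS_alt a b
  unfold LCMS LCMS_alt
  simp only [matrix_eq, trace_eq, List.reverse_nil, incrA_eq, decrA_eq, lisLens_eq]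
  rw [← dp_length ((traceB a b (rowsB a b) a.length b.length []).reverse)]
  rw [final_fold_eq _ _ (by simp [dp_length])]
  rw [min_def]
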